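-- pv_equiv track=rewrite | github.com/ohmatt160/library-ai-chatbot-v2.0 | app/models/dialogue_manager.py | _get_clarification_questions
-- ===== SOURCE A (Python) =====
-- from typing import Dict, List, Optional
--
-- def _get_clarification_questions(user_message: str, confidence) -> List[str]:
--     """
--     Generate clarification questions based on the user's message
--     """
--     # Ensure confidence is numeric
--     try:
--         conf_value = float(confidence)
--     except (ValueError, TypeError):
--         conf_value = 0.0
--
--     questions = []
--
--     # Common library topics to suggest
--     library_topics = [
--         "Library hours and schedule",
--         "Finding and searching for books",
--         "Borrowing and returning books",
--         "Library policies and rules",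
--         "Research assistance",
--         "Using library computers"
--     ]
--
--     # If confidence is very low, offer general topics
--     if conf_value < 0.3:
--         questions = library_topics[:3]
--
--     # If we detect some keywords, offer related topics
--     user_lower = user_message.lower()
--
--     if any(word in user_lower for word in ['hour', 'time', 'open', 'close']):
--         questions = ["Library opening hours", "Weekend hours", "Holiday schedule"]
--     elif any(word in user_lower for word in ['book', 'find', 'search', 'look']):
--         questions = ["Search by title", "Search by author", "E-book availability"]
--     elif any(word in user_lower for word in ['borrow', 'loan', 'return', 'due']):
--         questions = ["Borrowing period", "Late fees", "Renewing books"]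
--     else:
--         # Default suggestions
--         questions = ["Library hours", "Book search", "Borrowing information"]
--
--     return questions
-- ===== SOURCE B (Python) =====
-- from typing import List
--
-- # Flat keyword -> priority map (priority = index of its question group).
-- _KEYWORD_PRIORITY = {
--     'hour': 0, 'time': 0, 'open': 0, 'close': 0,
--     'book': 1, 'find': 1, 'search': 1, 'look': 1,
--     'borrow': 2, 'loan': 2, 'return': 2, 'due': 2,
-- }
--
-- # Question groups indexed by priority; slot 3 is the default.
-- _QUESTIONS = [
--     ["Library opening hours", "Weekend hours", "Holiday schedule"],
--     ["Search by title", "Search by author", "E-book availability"],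
--     ["Borrowing period", "Late fees", "Renewing books"],
--     ["Library hours", "Book search", "Borrowing information"],
-- ]
--
--
-- def _get_clarification_questions(user_message: str, confidence) -> List[str]:
--     # Exhaustive scan: find the minimum priority among ALL keywords present,
--     # then index into the question table (3 = no keyword matched -> default).
--     low = user_message.lower()
--     best = 3
--     for word, pri in _KEYWORD_PRIORITY.items():
--         if pri < best and word in low:
--             best = pri
--     return _QUESTIONS[best]
-- ===== Notes on version B (the rewrite author's own statement) =====
-- stated objective: alternative
-- what changed: Replaced the if/elif chain of per-group any() scans (plus A's dead confidence block) with a flat keyword->priority map scanned exhaustively with a running minimum, the answer then read off an indexed question table.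
import Mathlib
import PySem

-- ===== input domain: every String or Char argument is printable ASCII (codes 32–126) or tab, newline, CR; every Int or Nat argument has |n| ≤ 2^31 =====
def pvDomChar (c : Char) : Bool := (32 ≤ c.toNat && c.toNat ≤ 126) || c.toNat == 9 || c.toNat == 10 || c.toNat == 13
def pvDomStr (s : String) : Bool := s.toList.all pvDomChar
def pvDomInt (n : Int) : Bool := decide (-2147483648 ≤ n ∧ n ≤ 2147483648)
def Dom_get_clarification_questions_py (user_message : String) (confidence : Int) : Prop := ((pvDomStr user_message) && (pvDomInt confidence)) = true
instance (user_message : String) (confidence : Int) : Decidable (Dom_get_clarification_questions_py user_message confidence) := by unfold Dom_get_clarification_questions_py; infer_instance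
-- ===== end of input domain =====

-- B replaces the if/elif chain (and A's dead confidence block) with an exhaustive min-priority scan over a flat keyword->priority map plus an indexed question table; alternative decomposition, same cost.


-- ===== PORT A =====
-- Port of A. `float(confidence)` always succeeds for an int, so the try/except takes the
-- try path; `conf_value < 0.3` for an integer confidence is `confidence ≤ 0` (exact).
-- The result of that branch is dead (overwritten below), but it is kept, as in A.
def get_clarification_questions_py (user_message : String) (confidence : Int) : List String :=
  let conf_value := confidence
  let questions : List String := []
  let library_topics : List String :=
    ["Library hours and schedule", "Finding and searching for books",
     "Borrowing and returning books", "Library policies and rules",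
     "Research assistance", "Using library computers"]
  let questions := if conf_value ≤ 0 then library_topics.take 3 else questions
  let user_lower := PySem.Str.lower user_message
  let questions :=
    if ["hour", "time", "open", "close"].any (fun w => PySem.Str.isIn w user_lower) then
      ["Library opening hours", "Weekend hours", "Holiday schedule"]
    else if ["book", "find", "search", "look"].any (fun w => PySem.Str.isIn w user_lower) then
      ["Search by title", "Search by author", "E-book availability"]
    else if ["borrow", "loan", "return", "due"].any (fun w => PySem.Str.isIn w user_lower) then
      ["Borrowing period", "Late fees", "Renewing books"]
    else
      ["Library hours", "Book search", "Borrowing information"]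
  questions

-- ===== PORT B =====
-- Port of B: exhaustive scan of a flat keyword->priority map with a running minimum,
-- the answer read off an indexed question table (priority 3 = default).
def pvKeywordPriority : List (String × Int) :=
  [("hour", 0), ("time", 0), ("open", 0), ("close", 0),
   ("book", 1), ("find", 1), ("search", 1), ("look", 1),
   ("borrow", 2), ("loan", 2), ("return", 2), ("due", 2)]

def pvQuestionTable : List (List String) :=
  [["Library opening hours", "Weekend hours", "Holiday schedule"],
   ["Search by title", "Search by author", "E-book availability"],
   ["Borrowing period", "Late fees", "Renewing books"],
   ["Library hours", "Book search", "Borrowing information"]]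

def get_clarification_questions_py_alt (user_message : String) (confidence : Int) : List String :=
  let low := PySem.Str.lower user_message
  let best : Int := pvKeywordPriority.foldl
    (fun b wp => if wp.2 < b && PySem.Str.isIn wp.1 low then wp.2 else b) 3
  match PySem.List.pyGet? pvQuestionTable best with
  | some q => q
  | none => []   -- unreachable: best ∈ {0,1,2,3}

-- ===== PRECONDITION & SPEC =====
def Spec_get_clarification_questions_py (user_message : String) (confidence : Int) (out : List String) : Prop := out = get_clarification_questions_py_alt user_message confidence
instance (user_message : String) (confidence : Int) (out : List String) : Decidable (Spec_get_clarification_questions_py user_message confidence out) := by unfold Spec_get_clarification_questions_py; infer_instance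

-- ===== CLAIM =====
def Claim_equal_get_clarification_questions_py : Prop := ∀ (user_message : String) (confidence : Int), Dom_get_clarification_questions_py user_message confidence → Spec_get_clarification_questions_py user_message confidence (get_clarification_questions_py user_message confidence)

-- ===== LEMMAS AND PROOFS =====

-- One keyword group (all priority p) scanned from accumulator b with p < b:
-- the running minimum becomes p iff some keyword matches.
theorem pvGrp (f : String → Bool) (w1 w2 w3 w4 : String) (p b : Int) (hpb : p < b) :
    List.foldl (fun b wp => if wp.2 < b && f wp.1 then wp.2 else b) b
      [(w1, p), (w2, p), (w3, p), (w4, p)]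
    = if f w1 || (f w2 || (f w3 || f w4)) then p else b := by
  have h : ¬ p < p := lt_irrefl p
  simp only [List.foldl_cons, List.foldl_nil]
  cases f w1 <;> cases f w2 <;> cases f w3 <;> cases f w4 <;> simp [hpb]

-- A group whose priority p is not below the accumulator b leaves it unchanged.
theorem pvGrpGe (f : String → Bool) (w1 w2 w3 w4 : String) (p b : Int) (hbp : b ≤ p) :
    List.foldl (fun b wp => if wp.2 < b && f wp.1 then wp.2 else b) b
      [(w1, p), (w2, p), (w3, p), (w4, p)]
    = b := by
  have h : ¬ p < b := not_lt.mpr hbp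
  simp [List.foldl_cons, List.foldl_nil, h]


-- ===== VERDICT =====
theorem get_clarification_questions_py_spec : Claim_equal_get_clarification_questions_py := by
  intro user_message confidence _
  unfold Spec_get_clarification_questions_py get_clarification_questions_py
    get_clarification_questions_py_alt pvKeywordPriority
  dsimp only
  simp only [List.any_cons, List.any_nil, Bool.or_false]
  generalize PySem.Str.lower user_message = low
  rw [show ([("hour", (0:Int)), ("time", 0), ("open", 0), ("close", 0),
        ("book", 1), ("find", 1), ("search", 1), ("look", 1),
        ("borrow", 2), ("loan", 2), ("return", 2), ("due", 2)] : List (String × Int))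
      = [("hour", 0), ("time", 0), ("open", 0), ("close", 0)] ++
        ([("book", 1), ("find", 1), ("search", 1), ("look", 1)] ++
         [("borrow", 2), ("loan", 2), ("return", 2), ("due", 2)]) from rfl,
      List.foldl_append, List.foldl_append,
      pvGrp (fun w => PySem.Str.isIn w low) _ _ _ _ 0 3 (by norm_num)]
  by_cases hA0 : (PySem.Str.isIn "hour" low || (PySem.Str.isIn "time" low ||
      (PySem.Str.isIn "open" low || PySem.Str.isIn "close" low))) = true
  · rw [if_pos hA0, hA0, if_pos rfl,
      pvGrpGe (fun w => PySem.Str.isIn w low) _ _ _ _ 1 0 (by norm_num),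
      pvGrpGe (fun w => PySem.Str.isIn w low) _ _ _ _ 2 0 (by norm_num)]
    rfl
  · rw [if_neg hA0, if_neg hA0,
      pvGrp (fun w => PySem.Str.isIn w low) _ _ _ _ 1 3 (by norm_num)]
    by_cases hA1 : (PySem.Str.isIn "book" low || (PySem.Str.isIn "find" low ||
        (PySem.Str.isIn "search" low || PySem.Str.isIn "look" low))) = true
    · rw [if_pos hA1, hA1, if_pos rfl,
        pvGrpGe (fun w => PySem.Str.isIn w low) _ _ _ _ 2 1 (by norm_num)]
      rfl
    · rw [if_neg hA1, if_neg hA1,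
        pvGrp (fun w => PySem.Str.isIn w low) _ _ _ _ 2 3 (by norm_num)]
      by_cases hA2 : (PySem.Str.isIn "borrow" low || (PySem.Str.isIn "loan" low ||
          (PySem.Str.isIn "return" low || PySem.Str.isIn "due" low))) = true
      · rw [if_pos hA2, hA2, if_pos rfl]; rfl
      · rw [if_neg hA2, if_neg hA2]; rfl
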